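-- pv_equiv track=rewrite | github.com/KimSky904/Mirim-School-Hub | CosProPython/연습5회/3.py | solution
-- ===== SOURCE A (Python) =====
-- def func_a(a,length) :
--     for i in range(len(a)) :
--         if a[i] >= length :
--             return i
--     return -1
--
-- def solution(N,orders) :
--     material = [8 for _ in range(N)]
--     k = 0
--     price = 0
--     for o in orders :
--         k = func_a(material,o)
--         if k >= 0 :
--             material[k] -= o
--             price += 3000 * o
--
--     return price
-- ===== SOURCE B (Python) =====
-- def solution(N, orders):
--     # Persistent segment tree over the N capacity-8 slabs, keyed on the maximum
--     # remaining capacity of a range; the first-fit slab is found by descending to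
--     # the leftmost leaf with capacity >= order, and the all-8 initial tree is
--     # built by memoised sharing without materialising N slots.
--     if N <= 0:
--         return 0
--     memo = {}
--
--     def build(n):
--         # tree node: (size, mx, left, right); leaf iff left is None
--         if n in memo:
--             return memo[n]
--         if n == 1:
--             t = (1, 8, None, None)
--         else:
--             l = build(n // 2)
--             r = build(n - n // 2)
--             t = (n, max(l[1], r[1]), l, r)
--         memo[n] = t
--         return t
--
--     def find(t, o):
--         # leftmost leaf index with value >= o, together with that value; None if none
--         if t[1] < o:
--             return None
--         i = 0
--         while t[2] is not None:
--             if t[2][1] >= o: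
--                 t = t[2]
--             else:
--                 i += t[2][0]
--                 t = t[3]
--         return (i, t[1])
--
--     def update(t, i, v):
--         # path-copying point update
--         if t[2] is None:
--             return (1, v, None, None)
--         l, r = t[2], t[3]
--         if i < l[0]:
--             l = update(l, i, v)
--         else:
--             r = update(r, i - l[0], v)
--         return (t[0], max(l[1], r[1]), l, r)
--
--     t = build(N)
--     price = 0
--     for o in orders:
--         hit = find(t, o)
--         if hit is not None:
--             i, c = hit
--             t = update(t, i, c - o)
--             price += 3000 * o
--     return price
-- ===== Notes on version B (the rewrite author's own statement) =====
-- stated objective: alternative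
-- what changed: B replaces the per-order linear first-fit scan over an N-slot capacity array with a persistent max segment tree: the leftmost slab with capacity >= order is found by tree descent, and the initial all-8 tree is built by memoised sharing without materialising N slots.
import Mathlib
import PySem

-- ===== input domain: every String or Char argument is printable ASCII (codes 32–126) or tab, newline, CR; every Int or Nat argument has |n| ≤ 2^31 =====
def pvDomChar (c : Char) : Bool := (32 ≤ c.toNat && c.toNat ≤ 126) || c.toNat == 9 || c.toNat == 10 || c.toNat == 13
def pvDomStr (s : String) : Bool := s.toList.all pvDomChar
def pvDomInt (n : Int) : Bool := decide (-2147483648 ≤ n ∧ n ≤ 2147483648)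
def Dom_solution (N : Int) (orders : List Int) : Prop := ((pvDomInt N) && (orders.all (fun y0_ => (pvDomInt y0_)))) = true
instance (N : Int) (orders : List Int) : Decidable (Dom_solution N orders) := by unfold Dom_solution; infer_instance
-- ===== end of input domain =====

-- B replaces A's linear first-fit scan per order with a persistent max segment tree
-- (leftmost-leaf-with-capacity-≥-order descent): a different data structure, same result.

-- ===== PORT A =====
-- func_a: scan indices in order, return first i with a[i] >= length, else -1
def funcAGo (a : List Int) (length : Int) (i : Int) : Int :=
  match a with
  | [] => -1
  | x :: xs => if x ≥ length then i else funcAGo xs length (i + 1)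

def func_a (a : List Int) (length : Int) : Int := funcAGo a length 0

-- the for-loop over orders; state (material, price); the index k returned by func_a is
-- non-negative and in range when the branch is taken, so set/getD at k.toNat is exact
def solALoop (orders : List Int) (material : List Int) (price : Int) : List Int × Int :=
  match orders with
  | [] => (material, price)
  | o :: rest =>
    let k := func_a material o
    if k ≥ 0 then
      solALoop rest (material.set k.toNat (material.getD k.toNat 0 - o)) (price + 3000 * o)
    else
      solALoop rest material price

def solution (N : Int) (orders : List Int) : Int :=
  (solALoop orders (List.replicate N.toNat 8) 0).2

-- ===== PORT B =====
-- Source B's tree tuple (size, mx, l, r) / leaf (1, cap, None, None) becomes an inductive;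
-- size of a leaf is the implicit 1, stored sizes/maxima are kept exactly as Source B keeps them.
inductive STree : Type
  | leaf : Int → STree
  | node : Nat → Int → STree → STree → STree
deriving DecidableEq, Repr

def STree.mx : STree → Int
  | .leaf c => c
  | .node _ m _ _ => m

def STree.sz : STree → Nat
  | .leaf _ => 1
  | .node s _ _ _ => s

-- Source B's build(n); the memo dict only shares identical subtrees (speed), it does not
-- change the constructed tree, so the port is the plain recursion.
def buildT (n : Nat) : STree :=
  if _h : n ≤ 1 then .leaf 8
  else
    let l := buildT (n / 2)
    let r := buildT (n - n / 2)
    .node n (max l.mx r.mx) l r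
decreasing_by all_goals omega

-- Source B's find: the while-descent, i the accumulated offset of skipped left subtrees
def findGo : STree → Int → Int → Int × Int
  | .leaf c, _, i => (i, c)
  | .node _ _ l r, o, i => if l.mx ≥ o then findGo l o i else findGo r o (i + (l.sz : Int))

def findT (t : STree) (o : Int) : Option (Int × Int) :=
  if t.mx < o then none else some (findGo t o 0)

-- Source B's update: path-copying point update
def updT : STree → Int → Int → STree
  | .leaf _, _, v => .leaf v
  | .node s _ l r, i, v =>
    if i < (l.sz : Int) then
      let l' := updT l i v
      .node s (max l'.mx r.mx) l' r
    else
      let r' := updT r (i - (l.sz : Int)) v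
      .node s (max l.mx r'.mx) l r'

def solBLoop (orders : List Int) (t : STree) (price : Int) : Int :=
  match orders with
  | [] => price
  | o :: rest =>
    match findT t o with
    | none => solBLoop rest t price
    | some (i, c) => solBLoop rest (updT t i (c - o)) (price + 3000 * o)

def solution_alt (N : Int) (orders : List Int) : Int :=
  if N ≤ 0 then 0 else solBLoop orders (buildT N.toNat) 0

-- ===== PRECONDITION & SPEC =====
def Spec_solution (N : Int) (orders : List Int) (out : Int) : Prop := out = solution_alt N orders
instance (N : Int) (orders : List Int) (out : Int) : Decidable (Spec_solution N orders out) := by unfold Spec_solution; infer_instance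

-- ===== CLAIM (what is proved, stated in full; the proofs are below) =====
def Claim_equal_solution : Prop := ∀ (N : Int) (orders : List Int), Dom_solution N orders → Spec_solution N orders (solution N orders)

-- ===== LEMMAS AND PROOFS =====

-- the list of leaf values, left to right
def STree.toList : STree → List Int
  | .leaf c => [c]
  | .node _ _ l r => l.toList ++ r.toList

-- structural invariant: stored sizes are leaf counts, stored maxima are children maxima
def STInv : STree → Prop
  | .leaf _ => True
  | .node s m l r => STInv l ∧ STInv r ∧ s = l.toList.length + r.toList.length ∧ m = max l.mx r.mx

theorem sz_eq (t : STree) (h : STInv t) : t.sz = t.toList.length := by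
  cases t with
  | leaf c => rfl
  | node s m l r => simp [STree.sz, STree.toList, h.2.2.1]

theorem mx_ub (t : STree) (h : STInv t) : ∀ x ∈ t.toList, x ≤ t.mx := by
  induction t with
  | leaf c => simp [STree.toList, STree.mx]
  | node s m l r ihl ihr =>
    intro x hx
    simp only [STree.toList, List.mem_append] at hx
    simp only [STree.mx, h.2.2.2]
    rcases hx with hx | hx
    · exact le_trans (ihl h.1 x hx) (le_max_left _ _)
    · exact le_trans (ihr h.2.1 x hx) (le_max_right _ _)

theorem findIdx?_none_of_ub (xs : List Int) (o m : Int) (hm : m < o)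
    (h : ∀ x ∈ xs, x ≤ m) : xs.findIdx? (fun c => decide (o ≤ c)) = none := by
  rw [List.findIdx?_eq_none_iff]
  intro x hx
  have := h x hx
  simp only [decide_eq_false_iff_not]
  omega

theorem funcAGo_some (xs : List Int) (o i : Int) (j : Nat)
    (h : xs.findIdx? (fun c => decide (o ≤ c)) = some j) : funcAGo xs o i = i + j := by
  induction xs generalizing i j with
  | nil => simp at h
  | cons x xs ih =>
    rw [List.findIdx?_cons] at h
    by_cases hx : o ≤ x
    · simp [hx] at h
      simp [funcAGo, ge_iff_le, hx, ← h]
    · simp [hx] at h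
      rcases h with ⟨j', hj', rfl⟩
      have := ih (i + 1) j' hj'
      simp only [funcAGo, ge_iff_le, if_neg hx, this]
      push_cast
      ring

theorem funcAGo_none (xs : List Int) (o i : Int)
    (h : xs.findIdx? (fun c => decide (o ≤ c)) = none) : funcAGo xs o i = -1 := by
  induction xs generalizing i with
  | nil => rfl
  | cons x xs ih =>
    rw [List.findIdx?_cons] at h
    by_cases hx : o ≤ x
    · rw [if_pos (by simpa using hx)] at h
      exact absurd h (Option.some_ne_none 0)
    · rw [if_neg (by simpa using hx)] at h
      have h' : xs.findIdx? (fun c => decide (o ≤ c)) = none := by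
        cases hfi : xs.findIdx? (fun c => decide (o ≤ c)) with
        | none => rfl
        | some j => rw [hfi] at h; simp at h
      simp [funcAGo, ge_iff_le, hx, ih _ h']

-- the descent finds exactly the first leaf with value ≥ o, and returns its value
theorem findGo_spec (t : STree) (hI : STInv t) (o : Int) (ho : o ≤ t.mx) (i : Int) :
    ∃ j : Nat, t.toList.findIdx? (fun c => decide (o ≤ c)) = some j ∧
      findGo t o i = (i + j, t.toList.getD j 0) := by
  induction t generalizing i with
  | leaf c =>
    refine ⟨0, ?_, ?_⟩
    · simpa [STree.toList, List.findIdx?_cons] using ho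
    · simp [findGo, STree.toList]
  | node s m l r ihl ihr =>
    by_cases hl : o ≤ l.mx
    · rcases ihl hI.1 hl i with ⟨j, hj, hgo⟩
      have hjlt : j < l.toList.length := (List.findIdx?_eq_some_iff_findIdx_eq.mp hj).1
      refine ⟨j, ?_, ?_⟩
      · simp [STree.toList, List.findIdx?_append, hj]
      · simp only [findGo, ge_iff_le, if_pos hl, hgo, STree.toList]
        simp [List.getD_eq_getElem?_getD, List.getElem?_append_left hjlt]
    · have hr : o ≤ r.mx := by
        have hm : m = max l.mx r.mx := hI.2.2.2
        have ho' : o ≤ max l.mx r.mx := by rw [← hm]; exact ho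
        rcases le_max_iff.mp ho' with h | h
        · exact absurd h hl
        · exact h
      rcases ihr hI.2.1 hr (i + (l.sz : Int)) with ⟨j, hj, hgo⟩
      have hln : l.toList.findIdx? (fun c => decide (o ≤ c)) = none :=
        findIdx?_none_of_ub _ o l.mx (by omega) (mx_ub l hI.1)
      refine ⟨l.toList.length + j, ?_, ?_⟩
      · simp only [STree.toList, List.findIdx?_append, hln, hj]
        simp
        omega
      · simp only [findGo, ge_iff_le, if_neg hl, hgo, STree.toList]
        rw [sz_eq l hI.1]
        have hfst : i + (l.toList.length : Int) + (j : Int)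
            = i + ((l.toList.length + j : Nat) : Int) := by push_cast; ring
        have hsnd : r.toList.getD j 0
            = (l.toList ++ r.toList).getD (l.toList.length + j) 0 := by
          rw [List.getD_eq_getElem?_getD, List.getD_eq_getElem?_getD,
            List.getElem?_append_right (Nat.le_add_right _ _), Nat.add_sub_cancel_left]
        rw [hfst, hsnd]

-- when no leaf reaches o, the list has no element ≥ o
theorem findIdx?_none_of_mx (t : STree) (hI : STInv t) (o : Int) (ho : t.mx < o) :
    t.toList.findIdx? (fun c => decide (o ≤ c)) = none :=
  findIdx?_none_of_ub _ o t.mx ho (mx_ub t hI)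

-- update = List.set on the leaves, and preserves the invariant
theorem updT_spec (t : STree) (hI : STInv t) (j : Nat) (v : Int) (hj : j < t.toList.length) :
    (updT t (j : Int) v).toList = t.toList.set j v ∧ STInv (updT t (j : Int) v) := by
  induction t generalizing j with
  | leaf c =>
    simp only [STree.toList, List.length_cons, List.length_nil] at hj
    interval_cases j
    exact ⟨rfl, trivial⟩
  | node s m l r ihl ihr =>
    simp only [STree.toList, List.length_append] at hj
    by_cases hlt : j < l.toList.length
    · have hcond : (j : Int) < (l.sz : Int) := by rw [sz_eq l hI.1]; exact_mod_cast hlt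
      rcases ihl hI.1 j hlt with ⟨hset, hinv⟩
      refine ⟨?_, ?_⟩
      · simp only [updT, if_pos hcond, STree.toList, hset]
        rw [List.set_append_left _ _ hlt]
      · simp only [updT, if_pos hcond]
        exact ⟨hinv, hI.2.1, by simp [hset, hI.2.2.1], rfl⟩
    · have hge : l.toList.length ≤ j := Nat.le_of_not_lt hlt
      have hcond : ¬ (j : Int) < (l.sz : Int) := by
        rw [sz_eq l hI.1]; exact_mod_cast hlt
      have hcast : (j : Int) - (l.sz : Int) = ((j - l.toList.length : Nat) : Int) := by
        rw [sz_eq l hI.1]; omega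
      rcases ihr hI.2.1 (j - l.toList.length) (by omega) with ⟨hset, hinv⟩
      refine ⟨?_, ?_⟩
      · simp only [updT, if_neg hcond, STree.toList, hcast, hset]
        rw [List.set_append_right _ _ hge]
      · simp only [updT, if_neg hcond, hcast]
        exact ⟨hI.1, hinv, by simp [hset, hI.2.2.1], rfl⟩

-- build n is the all-8 tree of n leaves
theorem buildT_spec (n : Nat) (hn : 1 ≤ n) :
    (buildT n).toList = List.replicate n 8 ∧ STInv (buildT n) := by
  induction n using Nat.strong_induction_on with
  | _ n ih =>
    rw [buildT]
    by_cases h1 : n ≤ 1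
    · rw [dif_pos h1]
      have : n = 1 := by omega
      subst this
      exact ⟨rfl, trivial⟩
    · rw [dif_neg h1]
      rcases ih (n / 2) (by omega) (by omega) with ⟨hl, hIl⟩
      rcases ih (n - n / 2) (by omega) (by omega) with ⟨hr, hIr⟩
      refine ⟨?_, hIl, hIr, ?_, rfl⟩
      · simp only [STree.toList, hl, hr, ← List.replicate_add]
        congr 1
        omega
      · simp only [hl, hr, List.length_replicate]
        omega

-- A's loop on an empty material list never places anything
theorem solALoop_nil (orders : List Int) (p : Int) : (solALoop orders [] p).2 = p := by
  induction orders generalizing p with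
  | nil => rfl
  | cons o rest ih =>
    simp only [solALoop, func_a, funcAGo]
    rw [if_neg (by norm_num : ¬ (0 : Int) ≤ -1)]
    exact ih p

-- main loop correspondence: the tree's leaves are A's material list
theorem loop_corr (orders : List Int) :
    ∀ (t : STree), STInv t → ∀ (price : Int),
      (solALoop orders t.toList price).2 = solBLoop orders t price := by
  induction orders with
  | nil => intro t _ price; rfl
  | cons o rest ih =>
    intro t hI price
    simp only [solALoop, solBLoop, func_a]
    by_cases ho : t.mx < o
    · have hnone := findIdx?_none_of_mx t hI o ho
      rw [funcAGo_none _ _ _ hnone]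
      rw [if_neg (by norm_num : ¬ (0 : Int) ≤ -1)]
      simp only [findT, if_pos ho]
      exact ih t hI price
    · rw [not_lt] at ho
      rcases findGo_spec t hI o ho 0 with ⟨j, hj, hgo⟩
      have hjlt : j < t.toList.length := (List.findIdx?_eq_some_iff_findIdx_eq.mp hj).1
      have hA : funcAGo t.toList o 0 = (j : Int) := by
        rw [funcAGo_some _ _ _ _ hj]; ring
      rw [hA, if_pos (Int.natCast_nonneg j)]
      simp only [findT, if_neg (not_lt.mpr ho), hgo]
      have hz : (0 : Int) + (j : Int) = (j : Int) := by ring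
      rw [hz]
      rcases updT_spec t hI j (t.toList.getD j 0 - o) hjlt with ⟨hset, hinv⟩
      have := ih (updT t (j : Int) (t.toList.getD j 0 - o)) hinv (price + 3000 * o)
      rw [hset] at this
      simpa [Int.toNat_natCast] using this

-- ===== VERDICT (by name: the statement is the Claim_ definition above) =====
theorem solution_spec : Claim_equal_solution := by
  intro N orders _
  unfold Spec_solution solution solution_alt
  by_cases hN : N ≤ 0
  · rw [if_pos hN]
    have : N.toNat = 0 := by omega
    rw [this]
    simpa using solALoop_nil orders 0
  · rw [if_neg hN]
    rcases buildT_spec N.toNat (by omega) with ⟨hlist, hinv⟩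
    have := loop_corr orders (buildT N.toNat) hinv 0
    rw [hlist] at this
    exact this
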